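-- pv_equiv track=rewrite | github.com/lomaxanthony/467Capstone | backend/app.py | content_is_valid
-- ===== SOURCE A (Python) =====
-- def content_is_valid(content, list_to_be_valid, optional_fields=None):
--     if list_to_be_valid is None:
--         list_to_be_valid = []
--     if optional_fields is None:
--         optional_fields = []
--
--     # Ensure all required fields are present
--     for field in list_to_be_valid:
--         if field not in content:
--             return False
--
--     # Ensure no unexpected fields are present
--     allowed_fields = set(list_to_be_valid + optional_fields)
--     for key in content.keys():
--         if key not in allowed_fields:
--             return False
--
--     return True
-- ===== SOURCE B (Python) =====
-- def content_is_valid(content, list_to_be_valid, optional_fields=None):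
--     # Single marking pass: build a status table (required fields marked True,
--     # optional False), flip each content key's mark off as it is seen; valid
--     # iff every key was in the table and no required mark is left.
--     status = {}
--     for f in optional_fields or []:
--         status[f] = False
--     for f in list_to_be_valid or []:
--         status[f] = True
--     for key in content:
--         if key not in status:
--             return False
--         status[key] = False
--     return not any(status.values())
-- ===== Notes on version B (the rewrite author's own statement) =====
-- stated objective: alternative
-- what changed: Replaced A's two membership tests (required-in-keys loop, keys-in-allowed-set loop) by a single marking pass: a status table maps required fields to True and optional to False, each content key must be in the table and flips its mark off, and validity is 'no True mark left'.
import Mathlib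
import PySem

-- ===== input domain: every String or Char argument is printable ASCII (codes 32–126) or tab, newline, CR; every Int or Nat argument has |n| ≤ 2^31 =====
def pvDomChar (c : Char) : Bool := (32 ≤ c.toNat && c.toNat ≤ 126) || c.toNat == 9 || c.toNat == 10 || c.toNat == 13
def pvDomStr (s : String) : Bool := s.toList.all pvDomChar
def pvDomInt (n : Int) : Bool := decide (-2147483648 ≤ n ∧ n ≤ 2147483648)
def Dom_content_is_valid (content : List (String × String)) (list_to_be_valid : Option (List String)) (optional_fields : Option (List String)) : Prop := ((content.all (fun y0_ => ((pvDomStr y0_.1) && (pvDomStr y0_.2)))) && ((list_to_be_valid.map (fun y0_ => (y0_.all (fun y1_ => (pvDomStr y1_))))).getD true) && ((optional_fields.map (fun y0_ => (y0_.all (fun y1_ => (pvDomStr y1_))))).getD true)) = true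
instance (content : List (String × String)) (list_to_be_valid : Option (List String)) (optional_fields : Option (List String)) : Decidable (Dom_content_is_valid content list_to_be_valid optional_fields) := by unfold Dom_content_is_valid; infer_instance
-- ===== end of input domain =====

-- B replaces A's two membership tests by a single marking pass over a status table
-- (required marked True, flipped off when seen; valid iff no key missing and no True left) — alternative algorithm, not faster.

-- ===== PORT A =====
-- first loop of A: 'for field in list_to_be_valid: if field not in content: return False'
def civReqLoop (keys : List String) : List String → Bool
  | [] => true
  | f :: rest => if keys.contains f = false then false else civReqLoop keys rest

-- second loop of A: 'for key in content.keys(): if key not in allowed_fields: return False'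
def civAllowedLoop (allowed : PySem.Set String) : List String → Bool
  | [] => true
  | k :: rest => if PySem.Set.contains allowed k = false then false else civAllowedLoop allowed rest

def content_is_valid (content : List (String × String)) (list_to_be_valid : Option (List String)) (optional_fields : Option (List String)) : Bool :=
  let l := list_to_be_valid.getD []
  let o := optional_fields.getD []
  let keys := content.map Prod.fst
  if civReqLoop keys l = false then false
  else
    let allowed_fields := PySem.Set.ofList (l ++ o)
    civAllowedLoop allowed_fields keys

-- ===== PORT B =====
-- 'for f in xs: status[f] = v'
def civMark (d : PySem.Dict String Bool) (v : Bool) (l : List String) : PySem.Dict String Bool :=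
  l.foldl (fun d f => d.insert f v) d

-- 'for key in content: if key not in status: return False; status[key] = False'
def civScan : PySem.Dict String Bool → List String → Option (PySem.Dict String Bool)
  | d, [] => some d
  | d, k :: rest => if d.contains k = false then none else civScan (d.insert k false) rest

def content_is_valid_alt (content : List (String × String)) (list_to_be_valid : Option (List String)) (optional_fields : Option (List String)) : Bool :=
  let status := civMark (civMark PySem.Dict.empty false (optional_fields.getD [])) true (list_to_be_valid.getD [])
  match civScan status (content.map Prod.fst) with
  | none => false
  | some d => ! d.values.any id          -- 'return not any(status.values())'

-- ===== PRECONDITION & SPEC =====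
def Spec_content_is_valid (content : List (String × String)) (list_to_be_valid : Option (List String)) (optional_fields : Option (List String)) (out : Bool) : Prop := out = content_is_valid_alt content list_to_be_valid optional_fields
instance (content : List (String × String)) (list_to_be_valid : Option (List String)) (optional_fields : Option (List String)) (out : Bool) : Decidable (Spec_content_is_valid content list_to_be_valid optional_fields out) := by unfold Spec_content_is_valid; infer_instance

-- ===== CLAIM (what is proved, stated in full; the proofs are below) =====
def Claim_equal_content_is_valid : Prop := ∀ (content : List (String × String)) (list_to_be_valid : Option (List String)) (optional_fields : Option (List String)), Dom_content_is_valid content list_to_be_valid optional_fields → Spec_content_is_valid content list_to_be_valid optional_fields (content_is_valid content list_to_be_valid optional_fields)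

-- ===== LEMMAS AND PROOFS =====
theorem civReqLoop_iff (keys : List String) (l : List String) :
    civReqLoop keys l = true ↔ ∀ f ∈ l, f ∈ keys := by
  induction l with
  | nil => simp [civReqLoop]
  | cons f rest ih =>
    simp only [civReqLoop]
    cases hc : keys.contains f <;> simp_all

theorem civAllowedLoop_iff (allowed : PySem.Set String) (ks : List String) :
    civAllowedLoop allowed ks = true ↔ ∀ k ∈ ks, k ∈ allowed := by
  induction ks with
  | nil => simp [civAllowedLoop]
  | cons k rest ih =>
    simp only [civAllowedLoop]
    cases hc : PySem.Set.contains allowed k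
    · simp_all
    · simp_all

theorem content_is_valid_iff (content : List (String × String)) (lt of : Option (List String)) :
    content_is_valid content lt of = true ↔
      ((∀ f ∈ lt.getD [], f ∈ content.map Prod.fst) ∧
       (∀ k ∈ content.map Prod.fst, k ∈ lt.getD [] ∨ k ∈ of.getD [])) := by
  unfold content_is_valid
  cases hreq : civReqLoop (content.map Prod.fst) (lt.getD []) with
  | false =>
    simp only [hreq]
    constructor
    · intro hfalse; simp at hfalse
    · rintro ⟨h1, _⟩
      rw [← civReqLoop_iff (content.map Prod.fst)] at h1
      simp_all
  | true =>
    have h1 : ∀ f ∈ lt.getD [], f ∈ content.map Prod.fst :=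
      (civReqLoop_iff _ _).mp hreq
    simp only [hreq]
    rw [if_neg (by simp)]
    rw [civAllowedLoop_iff]
    simp only [PySem.Set.mem_ofList, List.mem_append]
    exact ⟨fun h2 => ⟨h1, h2⟩, fun ⟨_, h2⟩ => h2⟩

theorem civMark_get? (l : List String) (v : Bool) (d : PySem.Dict String Bool) (x : String) :
    (civMark d v l).get? x = if x ∈ l then some v else d.get? x := by
  induction l generalizing d with
  | nil => simp [civMark]
  | cons f rest ih =>
    simp only [civMark, List.foldl_cons] at *
    rw [ih]
    by_cases hx : x ∈ rest
    · simp [hx]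
    · by_cases hxf : x = f
      · subst hxf; simp [hx, PySem.Dict.get?_insert_self]
      · simp [hx, hxf, PySem.Dict.get?_insert_of_ne _ _ hxf]

theorem civMark_nodup (l : List String) (v : Bool) (d : PySem.Dict String Bool)
    (h : d.keys.Nodup) : (civMark d v l).keys.Nodup :=
  PySem.Dict.nodup_keys_foldl_insert l _ d h

theorem contains_insert_false_of_contains (d : PySem.Dict String Bool) (k x : String)
    (hc : d.contains k = true) : (d.insert k false).contains x = d.contains x := by
  rw [PySem.Dict.contains_insert]
  by_cases hx : x = k
  · subst hx; simp [hc]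
  · simp [hx]

theorem civScan_eq_none (d : PySem.Dict String Bool) (ks : List String) :
    civScan d ks = none ↔ ¬ (∀ k ∈ ks, d.contains k = true) := by
  induction ks generalizing d with
  | nil => simp [civScan]
  | cons k rest ih =>
    simp only [civScan]
    cases hc : d.contains k with
    | false => simp [hc]
    | true =>
      rw [if_neg (by simp), ih]
      have heq : ∀ x, (d.insert k false).contains x = d.contains x :=
        fun x => contains_insert_false_of_contains d k x hc
      simp [heq, hc]

theorem civScan_get? (d : PySem.Dict String Bool) (ks : List String) (d' : PySem.Dict String Bool)
    (h : civScan d ks = some d') (x : String) :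
    d'.get? x = if x ∈ ks then some false else d.get? x := by
  induction ks generalizing d with
  | nil => simp [civScan] at h; subst h; simp
  | cons k rest ih =>
    simp only [civScan] at h
    cases hc : d.contains k with
    | false => simp [hc] at h
    | true =>
      rw [hc, if_neg (by simp)] at h
      rw [ih _ h]
      by_cases hx : x ∈ rest
      · simp [hx]
      · by_cases hxk : x = k
        · subst hxk; simp [hx, PySem.Dict.get?_insert_self]
        · simp [hx, hxk, PySem.Dict.get?_insert_of_ne _ _ hxk]

theorem civScan_nodup (d : PySem.Dict String Bool) (ks : List String) (d' : PySem.Dict String Bool)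
    (h : civScan d ks = some d') (hnd : d.keys.Nodup) : d'.keys.Nodup := by
  induction ks generalizing d with
  | nil => simp [civScan] at h; subst h; exact hnd
  | cons k rest ih =>
    simp only [civScan] at h
    cases hc : d.contains k with
    | false => simp [hc] at h
    | true =>
      rw [hc, if_neg (by simp)] at h
      exact ih _ h (PySem.Dict.nodup_keys_insert _ _ _ hnd)

theorem values_any_iff (d : PySem.Dict String Bool) (hnd : d.keys.Nodup) :
    d.values.any id = true ↔ ∃ k, d.get? k = some true := by
  constructor
  · intro h
    rcases List.any_eq_true.mp h with ⟨v, hv, hvtrue⟩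
    simp only [id, ] at hvtrue
    subst hvtrue
    -- v = true ∈ d.values = d.items.map (·.2)
    have : ∃ p ∈ d.items, p.2 = true := by
      simpa [PySem.Dict.values] using hv
    rcases this with ⟨⟨k, w⟩, hp, hw⟩
    subst hw
    exact ⟨k, PySem.Dict.get?_of_mem_items d hp hnd⟩
  · rintro ⟨k, hk⟩
    have := PySem.Dict.mem_items_of_get?_eq_some d hk
    apply List.any_eq_true.mpr
    exact ⟨true, by simpa [PySem.Dict.values] using ⟨k, this⟩, rfl⟩

theorem content_is_valid_alt_iff (content : List (String × String)) (lt of : Option (List String)) :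
    content_is_valid_alt content lt of = true ↔
      ((∀ f ∈ lt.getD [], f ∈ content.map Prod.fst) ∧
       (∀ k ∈ content.map Prod.fst, k ∈ lt.getD [] ∨ k ∈ of.getD [])) := by
  simp only [content_is_valid_alt]
  set status := civMark (civMark PySem.Dict.empty false (of.getD [])) true (lt.getD []) with hst
  have hget : ∀ x, status.get? x =
      if x ∈ lt.getD [] then some true else if x ∈ of.getD [] then some false else none := by
    intro x
    rw [hst, civMark_get?]
    by_cases h1 : x ∈ lt.getD []
    · simp [h1]
    · rw [civMark_get?]; simp [h1, PySem.Dict.get?_empty]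
  have hnd : status.keys.Nodup := by
    rw [hst]
    exact civMark_nodup _ _ _ (civMark_nodup _ _ _ (by simp [PySem.Dict.keys_empty]))
  cases hscan : civScan status (content.map Prod.fst) with
  | none =>
    rw [civScan_eq_none] at hscan
    simp only [Bool.false_eq_true, false_iff]
    rintro ⟨_, h2⟩
    apply hscan
    intro k hk
    rw [PySem.Dict.contains_eq_isSome_get?, hget k]
    rcases h2 k hk with h | h
    · simp [h]
    · by_cases h1 : k ∈ lt.getD [] <;> simp [h1, h]
  | some d' =>
    have hnd' := civScan_nodup _ _ _ hscan hnd
    have hget' := civScan_get? _ _ _ hscan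
    have hcontains : ∀ k ∈ content.map Prod.fst, status.contains k = true := by
      by_contra hcon
      have : civScan status (content.map Prod.fst) = none := (civScan_eq_none _ _).mpr hcon
      simp [this] at hscan
    constructor
    · intro h
      have hno : ¬ ∃ k, d'.get? k = some true := by
        intro hex
        rw [← values_any_iff d' hnd'] at hex
        simp only [hex] at h
        exact absurd h (by simp)
      constructor
      · intro f hf
        by_contra hfk
        exact hno ⟨f, by rw [hget' f, if_neg hfk, hget f, if_pos hf]⟩
      · intro k hk
        have := hcontains k hk
        rw [PySem.Dict.contains_eq_isSome_get?, hget k] at this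
        by_cases h1 : k ∈ lt.getD []
        · exact Or.inl h1
        · by_cases h2 : k ∈ of.getD []
          · exact Or.inr h2
          · simp [h1, h2] at this
    · rintro ⟨h1, h2⟩
      have hno : d'.values.any id ≠ true := by
        rw [Ne, values_any_iff d' hnd']
        rintro ⟨k, hk⟩
        rw [hget' k] at hk
        by_cases hkm : k ∈ content.map Prod.fst
        · simp [hkm] at hk
        · rw [if_neg hkm, hget k] at hk
          by_cases hl : k ∈ lt.getD []
          · exact hkm (h1 k hl)
          · by_cases ho : k ∈ of.getD [] <;> simp [hl, ho] at hk
      cases hv : d'.values.any id with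
      | false => show (!d'.values.any id) = true; rw [hv]; rfl
      | true => exact absurd hv hno

-- ===== VERDICT (by name: the statement is the Claim_ definition above) =====
theorem content_is_valid_spec : Claim_equal_content_is_valid := by
  intro content lt of _
  unfold Spec_content_is_valid
  rw [Bool.eq_iff_iff, content_is_valid_iff, content_is_valid_alt_iff]
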